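-- pv_equiv track=rewrite | github.com/FNC001/ApolloX | generate_structure/bulk/generate_variable_component.py | find_coordinate_line_index
-- ===== SOURCE A (Python) =====
-- def find_coordinate_line_index(lines):
--     for i, line in enumerate(lines):
--         if "Direct" in line or "direct" in line:
--             return i
--     for i, line in enumerate(lines):
--         if "Cartesian" in line or "cartesian" in line:
--             return i
--     raise ValueError("Not found 'Direct' or 'Cartesian' in POSCAR")
-- ===== SOURCE B (Python) =====
-- def find_coordinate_line_index(lines):
--     cart_idx = None
--     for i, line in enumerate(lines):
--         if "Direct" in line or "direct" in line:
--             return i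
--         if cart_idx is None and ("Cartesian" in line or "cartesian" in line):
--             cart_idx = i
--     if cart_idx is not None:
--         return cart_idx
--     raise ValueError("Not found 'Direct' or 'Cartesian' in POSCAR")
-- ===== Notes on version B (the rewrite author's own statement) =====
-- stated objective: alternative
-- what changed: Replaces A's two sequential full scans with one single pass that returns immediately on the first Direct line while remembering the first Cartesian index as a fallback.
import Mathlib
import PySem

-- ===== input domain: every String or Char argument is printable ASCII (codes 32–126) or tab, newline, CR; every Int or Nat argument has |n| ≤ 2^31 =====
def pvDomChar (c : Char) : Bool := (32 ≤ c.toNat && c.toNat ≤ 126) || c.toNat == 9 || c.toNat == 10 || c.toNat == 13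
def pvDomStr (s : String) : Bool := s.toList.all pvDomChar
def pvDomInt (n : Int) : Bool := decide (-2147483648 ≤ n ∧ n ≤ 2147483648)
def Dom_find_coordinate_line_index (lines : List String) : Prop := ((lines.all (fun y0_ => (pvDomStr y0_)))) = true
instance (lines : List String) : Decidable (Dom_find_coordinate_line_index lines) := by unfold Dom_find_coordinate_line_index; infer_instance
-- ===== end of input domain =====

-- B replaces A's two sequential scans by a single pass that short-circuits on the
-- first Direct line and remembers the first Cartesian index as a fallback (alternative decomposition).


-- ===== PORT A =====
-- first scan of A: return index of first line containing "Direct"/"direct"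
def pvA_scanDirect (i : Nat) : List String → Option Int
  | [] => none
  | l :: ls =>
      if PySem.Str.isIn "Direct" l || PySem.Str.isIn "direct" l then some (i : Int)
      else pvA_scanDirect (i + 1) ls

-- second scan of A: return index of first line containing "Cartesian"/"cartesian"
def pvA_scanCart (i : Nat) : List String → Option Int
  | [] => none
  | l :: ls =>
      if PySem.Str.isIn "Cartesian" l || PySem.Str.isIn "cartesian" l then some (i : Int)
      else pvA_scanCart (i + 1) ls

-- A raises ValueError when both scans fail; those inputs are outside Pre_, the port returns 0 there.
def find_coordinate_line_index (lines : List String) : Int :=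
  match pvA_scanDirect 0 lines with
  | some j => j
  | none =>
      match pvA_scanCart 0 lines with
      | some j => j
      | none => 0

-- ===== PORT B =====
-- single pass: short-circuit on Direct, remember the first Cartesian index in cart
def pvB_go (i : Nat) (cart : Option Int) : List String → Option Int
  | [] => cart
  | l :: ls =>
      if PySem.Str.isIn "Direct" l || PySem.Str.isIn "direct" l then some (i : Int)
      else
        pvB_go (i + 1)
          (if cart.isNone && (PySem.Str.isIn "Cartesian" l || PySem.Str.isIn "cartesian" l)
           then some (i : Int) else cart) ls

-- B raises ValueError when the pass ends with cart = none; outside Pre_, the port returns 0 there.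
def find_coordinate_line_index_alt (lines : List String) : Int :=
  (pvB_go 0 none lines).getD 0

-- ===== PRECONDITION & SPEC =====
-- Pre_ excludes exactly the inputs where A raises ValueError: no line mentions Direct or Cartesian.
def Pre_find_coordinate_line_index (lines : List String) : Prop :=
  (lines.any (fun l =>
    PySem.Str.isIn "Direct" l || PySem.Str.isIn "direct" l ||
    PySem.Str.isIn "Cartesian" l || PySem.Str.isIn "cartesian" l)) = true
instance (lines : List String) : Decidable (Pre_find_coordinate_line_index lines) := by
  unfold Pre_find_coordinate_line_index; infer_instance

def pvWitness_find_coordinate_line_index : List String := ["foo bar", "Direct"]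

def Spec_find_coordinate_line_index (lines : List String) (out : Int) : Prop := out = find_coordinate_line_index_alt lines
instance (lines : List String) (out : Int) : Decidable (Spec_find_coordinate_line_index lines out) := by unfold Spec_find_coordinate_line_index; infer_instance

-- ===== CLAIM (what is proved, stated in full; the proofs are below) =====
def Claim_equal_find_coordinate_line_index : Prop := ∀ (lines : List String), Dom_find_coordinate_line_index lines → Pre_find_coordinate_line_index lines → Spec_find_coordinate_line_index lines (find_coordinate_line_index lines)

-- ===== LEMMAS AND PROOFS =====

-- B's single pass equals: result of A's first scan, else the carried candidate, else A's second scan.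
theorem pvB_go_eq (ls : List String) : ∀ (i : Nat) (cart : Option Int),
    pvB_go i cart ls =
      match pvA_scanDirect i ls with
      | some j => some j
      | none => cart.orElse (fun _ => pvA_scanCart i ls) := by
  induction ls with
  | nil => intro i cart; cases cart <;> simp [pvB_go, pvA_scanDirect, pvA_scanCart, Option.orElse]
  | cons l ls ih =>
      intro i cart
      simp only [pvB_go, pvA_scanDirect, pvA_scanCart, ih]
      cases cart <;> simp <;> split_ifs <;> simp

-- ===== VERDICT (by name: the statement is the Claim_ definition above) =====
theorem find_coordinate_line_index_spec : Claim_equal_find_coordinate_line_index := by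
  intro lines _ _
  unfold Spec_find_coordinate_line_index find_coordinate_line_index find_coordinate_line_index_alt
  rw [pvB_go_eq]
  cases pvA_scanDirect 0 lines <;> cases h : pvA_scanCart 0 lines <;>
    simp [Option.orElse]
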